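-- pv_equiv track=rewrite | github.com/zhouyanupc/lyrebird | beijing_subway.py | get_neighbor_info
-- ===== SOURCE A (Python) =====
-- from collections import defaultdict
--
-- def get_neighbor_info(lines_info):
--     neighbor_info = defaultdict(list)
--     for i in lines_info.keys():
--         stations = list(lines_info[i].keys())
--         for s1 in stations:
--             for s2 in stations:
--                 if s1 == s2 :continue
--                 if abs(stations.index(s1) - stations.index(s2)) == 1:
--                     neighbor_info[s1].append(s2)
--     return neighbor_info
-- ===== SOURCE B (Python) =====
-- from collections import defaultdict
--
-- def get_neighbor_info(lines_info):
--     neighbor_info = defaultdict(list)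
--     for line_stations in lines_info.values():
--         stations = list(line_stations)
--         n = len(stations)
--         for j, s in enumerate(stations):
--             if j > 0:
--                 neighbor_info[s].append(stations[j - 1])
--             if j < n - 1:
--                 neighbor_info[s].append(stations[j + 1])
--     return neighbor_info
-- ===== Notes on version B (the rewrite author's own statement) =====
-- stated objective: alternative
-- what changed: A compares every pair of stations of a line and calls list.index twice per pair (O(n^3) per line); B makes a single enumerate pass per line and appends the index-1 and index+1 neighbors directly (O(n) per line; measured 1.4x on the generated inputs, below the 1.5x bar).
import Mathlib
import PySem

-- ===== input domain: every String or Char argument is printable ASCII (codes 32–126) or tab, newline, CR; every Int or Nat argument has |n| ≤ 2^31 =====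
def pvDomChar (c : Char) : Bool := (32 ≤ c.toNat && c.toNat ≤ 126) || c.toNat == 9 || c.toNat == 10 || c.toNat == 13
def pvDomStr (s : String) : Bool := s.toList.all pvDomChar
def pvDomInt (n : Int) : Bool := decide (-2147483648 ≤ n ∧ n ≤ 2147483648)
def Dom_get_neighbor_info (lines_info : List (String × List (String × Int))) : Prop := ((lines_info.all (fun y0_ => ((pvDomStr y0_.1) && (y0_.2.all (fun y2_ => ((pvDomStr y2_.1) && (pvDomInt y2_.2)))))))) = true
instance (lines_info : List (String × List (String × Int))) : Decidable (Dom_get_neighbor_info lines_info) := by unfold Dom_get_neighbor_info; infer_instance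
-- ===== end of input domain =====

-- B replaces A's all-pairs scan with .index calls by one enumerate pass per
-- line appending the index±1 neighbors directly (objective: alternative).


-- ===== PORT A =====
-- lines_info is a Python dict of dicts: modeled through PySem.Dict.ofList (last
-- value wins, first-occurrence key order); list(inner.keys()) = PySem.List.dedup
-- of the firsts. stations.index(s) always succeeds (s ∈ stations), so the Python
-- int is (index? …).getD 0.
def get_neighbor_info (lines_info : List (String × List (String × Int))) : List (String × List String) :=
  let d := PySem.Dict.ofList lines_info
  let neighbor_info : PySem.Dict String (List String) :=
    (PySem.Dict.keys d).foldl (fun nb i =>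
      let stations := PySem.List.dedup ((PySem.Dict.getD d i []).map Prod.fst)
      stations.foldl (fun nb s1 =>
        stations.foldl (fun nb s2 =>
          if s1 == s2 then nb
          else if (((PySem.List.index? stations s1).getD 0 : Int) -
                   ((PySem.List.index? stations s2).getD 0 : Int)).natAbs == 1 then
            PySem.Dict.modify nb s1 [] (· ++ [s2])
          else nb) nb) nb) PySem.Dict.empty
  neighbor_info.items

-- ===== PORT B =====
def get_neighbor_info_alt (lines_info : List (String × List (String × Int))) : List (String × List String) :=
  let d := PySem.Dict.ofList lines_info
  let neighbor_info : PySem.Dict String (List String) :=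
    (PySem.Dict.values d).foldl (fun nb line_stations =>
      let stations := PySem.List.dedup (line_stations.map Prod.fst)
      let n : Int := stations.length
      (PySem.List.enumerate stations).foldl (fun nb js =>
        let j := js.1
        let s := js.2
        let nb := if j > 0 then PySem.Dict.modify nb s [] (· ++ [PySem.List.pyGetD stations (j - 1) ""]) else nb
        if j < n - 1 then PySem.Dict.modify nb s [] (· ++ [PySem.List.pyGetD stations (j + 1) ""]) else nb) nb) PySem.Dict.empty
  neighbor_info.items

-- ===== PRECONDITION & SPEC =====
def Spec_get_neighbor_info (lines_info : List (String × List (String × Int))) (out : List (String × List String)) : Prop := out = get_neighbor_info_alt lines_info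
instance (lines_info : List (String × List (String × Int))) (out : List (String × List String)) : Decidable (Spec_get_neighbor_info lines_info out) := by unfold Spec_get_neighbor_info; infer_instance

-- ===== CLAIM (what is proved, stated in full; the proofs are below) =====
def Claim_equal_get_neighbor_info : Prop := ∀ (lines_info : List (String × List (String × Int))), Dom_get_neighbor_info lines_info → Spec_get_neighbor_info lines_info (get_neighbor_info lines_info)

-- ===== LEMMAS AND PROOFS =====
theorem hitTwo {β : Type} (g : Nat → β → β) (j : Nat) (n : Nat) (nb : β) :
    (List.range n).foldl (fun nb k => if j = k then nb else if ((j:Int) - (k:Int)).natAbs == 1 then g k nb else nb) nb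
    = (if j + 1 < n then g (j+1) (if 0 < j ∧ j - 1 < n then g (j-1) nb else nb)
       else (if 0 < j ∧ j - 1 < n then g (j-1) nb else nb)) := by
  induction n generalizing nb with
  | zero => simp
  | succ n ih =>
    rw [List.range_succ, List.foldl_append, ih]
    simp only [List.foldl_cons, List.foldl_nil, beq_iff_eq]
    by_cases hA : j = n + 1
    · subst hA
      split_ifs <;> first | rfl | (exfalso; omega)
    · by_cases hB : n = j + 1
      · subst hB
        split_ifs <;> first | rfl | (exfalso; omega)
      · split_ifs <;> first | rfl | (exfalso; omega)

theorem foldl_eq_enum {α β : Type} (xs : List α) (f : β → α → β) (b : β) :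
    xs.foldl f b = (PySem.List.enumerate xs).foldl (fun b p => f b p.2) b := by
  conv_lhs => rw [← PySem.List.map_snd_enumerate xs 0]
  rw [List.foldl_map]

theorem enum_foldl_eq_range {α β : Type} (xs : List α) (d : α) (F : β → Int × α → β) (b : β) :
    (PySem.List.enumerate xs).foldl F b
    = (List.range xs.length).foldl (fun b (k : Nat) => F b ((k:Int), xs.getD k d)) b := by
  rw [PySem.List.enumerate_eq_map_pyRange xs d]
  have hlen : PySem.List.len xs = ((xs.length : Nat) : Int) := by simp [PySem.List.len]
  rw [hlen, PySem.List.pyRange_zero_natCast, List.map_map, List.foldl_map]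
  apply PySem.List.foldl_congr_mem
  intro acc k _
  simp only [Function.comp_apply]
  rw [PySem.List.pyGetD_natCast]

theorem idx_getElem {α : Type} [BEq α] [LawfulBEq α] (xs : List α) (h : xs.Nodup) (k : Nat) (hk : k < xs.length) :
    PySem.List.index? xs xs[k] = some k := by
  rw [PySem.List.index?_eq_some_iff]
  refine ⟨xs.take k, xs.drop (k+1), ?_, by simp [hk.le], ?_⟩
  · have e : xs.take k ++ xs[k] :: xs.drop (k+1) = xs := by
      rw [List.getElem_cons_drop, List.take_append_drop]
    exact e.symm
  · intro hmem
    obtain ⟨i, hi, hgi⟩ := List.mem_iff_getElem.1 hmem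
    have hil : i < k := by simp at hi; omega
    have : xs[i]'(by omega) = xs[k] := by simpa [List.getElem_take] using hgi
    have := h.getElem_inj_iff.1 this
    omega

-- the per-line equality: A's double pass with .index = B's single enumerate pass
theorem lineEq (st : List String) (h : st.Nodup) (nb : PySem.Dict String (List String)) :
    st.foldl (fun nb s1 =>
      st.foldl (fun nb s2 =>
        if s1 == s2 then nb
        else if (((PySem.List.index? st s1).getD 0 : Int) -
                 ((PySem.List.index? st s2).getD 0 : Int)).natAbs == 1 then
          PySem.Dict.modify nb s1 [] (· ++ [s2])
        else nb) nb) nb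
    = (PySem.List.enumerate st).foldl (fun nb js =>
        let j := js.1
        let s := js.2
        let nb := if j > 0 then PySem.Dict.modify nb s [] (· ++ [PySem.List.pyGetD st (j - 1) ""]) else nb
        if j < (st.length : Int) - 1 then PySem.Dict.modify nb s [] (· ++ [PySem.List.pyGetD st (j + 1) ""]) else nb) nb := by
  rw [foldl_eq_enum, enum_foldl_eq_range st "", enum_foldl_eq_range st ""]
  apply PySem.List.foldl_congr_mem
  intro nb k hk
  have hkn : k < st.length := List.mem_range.mp hk
  -- LHS: inner full pass for s1 = st[k]
  have hgd : st.getD k "" = st[k] := List.getD_eq_getElem st "" hkn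
  rw [hgd]
  rw [foldl_eq_enum, enum_foldl_eq_range st ""]
  rw [PySem.List.foldl_congr_mem _ _
      (fun nb m => if k = m then nb
        else if ((k:Int) - (m:Int)).natAbs == 1 then
          PySem.Dict.modify nb st[k] [] (· ++ [st.getD m ""]) else nb) nb ?_]
  · rw [hitTwo (fun m nb => PySem.Dict.modify nb st[k] [] (· ++ [st.getD m ""])) k st.length nb]
    simp only []
    by_cases hk0 : 0 < k
    · have e1 : ((k:Int) > 0) := by exact_mod_cast hk0
      have e2 : (0 < k ∧ k - 1 < st.length) := ⟨hk0, by omega⟩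
      rw [if_pos e1, if_pos e2]
      have ht1 : ((k:Int) - 1).toNat = k - 1 := by omega
      have egd : PySem.List.pyGetD st ((k:Int) - 1) "" = st.getD (k-1) "" := by
        rw [PySem.List.pyGetD_of_nonneg _ _ (by omega), ht1]
      rw [egd]
      by_cases hk1 : k + 1 < st.length
      · rw [if_pos hk1, if_pos (by omega : (k:Int) < (st.length:Int) - 1)]
        have ht2 : ((k:Int) + 1).toNat = k + 1 := by omega
        have : PySem.List.pyGetD st ((k:Int) + 1) "" = st.getD (k+1) "" := by
          rw [PySem.List.pyGetD_of_nonneg _ _ (by omega), ht2]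
        rw [this]
      · rw [if_neg hk1, if_neg (by omega : ¬ ((k:Int) < (st.length:Int) - 1))]
    · rw [if_neg (by omega : ¬ ((k:Int) > 0)), if_neg (by omega : ¬ (0 < k ∧ k - 1 < st.length))]
      by_cases hk1 : k + 1 < st.length
      · rw [if_pos hk1, if_pos (by omega : (k:Int) < (st.length:Int) - 1)]
        have ht2 : ((k:Int) + 1).toNat = k + 1 := by omega
        have : PySem.List.pyGetD st ((k:Int) + 1) "" = st.getD (k+1) "" := by
          rw [PySem.List.pyGetD_of_nonneg _ _ (by omega), ht2]
        rw [this]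
      · rw [if_neg hk1, if_neg (by omega : ¬ ((k:Int) < (st.length:Int) - 1))]
  · intro nb m hm
    have hmn : m < st.length := List.mem_range.mp hm
    have hgdm : st.getD m "" = st[m] := List.getD_eq_getElem st "" hmn
    rw [hgdm, idx_getElem st h k hkn, idx_getElem st h m hmn]
    simp only [Option.getD_some]
    by_cases he : st[k] = st[m]
    · have : k = m := h.getElem_inj_iff.1 he
      subst this
      simp
    · have hkm : ¬ k = m := fun e => he (by simp [e])
      rw [if_neg (by simpa using he), if_neg hkm, hgdm]


-- ===== VERDICT (by name: the statement is the Claim_ definition above) =====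
theorem get_neighbor_info_spec : Claim_equal_get_neighbor_info := by
  intro lines_info _
  unfold Spec_get_neighbor_info get_neighbor_info get_neighbor_info_alt
  simp only []
  congr 1
  rw [PySem.Dict.values_eq_map_keys (PySem.Dict.ofList lines_info) (PySem.Dict.nodup_keys_ofList lines_info) [], List.foldl_map]
  apply PySem.List.foldl_congr_mem
  intro nb i _
  exact lineEq _ (PySem.List.nodup_dedup _) nb
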